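-- pv_equiv track=rewrite | github.com/rohithbodagala/TIF-to-TXT | utils.py | getPN
-- ===== SOURCE A (Python) =====
-- def getPN(fileName):
--     temp = fileName.split('-')[-1]
--     count = 0
--     result = ''
--     for i in temp:
--         if i == '_':
--             count += 1
--             if count == 2:
--                 break
--             continue
--         result += i
--     return result
-- ===== SOURCE B (Python) =====
-- def getPN(fileName):
--     temp = fileName.split('-')[-1]
--     return ''.join(temp.split('_')[:2])
-- ===== Notes on version B (the rewrite author's own statement) =====
-- stated objective: simpler
-- what changed: Replaced the manual character loop with an underscore counter/break by a tokenize-then-recombine decomposition: split the last dash-segment on underscore and join its first two tokens.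
import Mathlib
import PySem

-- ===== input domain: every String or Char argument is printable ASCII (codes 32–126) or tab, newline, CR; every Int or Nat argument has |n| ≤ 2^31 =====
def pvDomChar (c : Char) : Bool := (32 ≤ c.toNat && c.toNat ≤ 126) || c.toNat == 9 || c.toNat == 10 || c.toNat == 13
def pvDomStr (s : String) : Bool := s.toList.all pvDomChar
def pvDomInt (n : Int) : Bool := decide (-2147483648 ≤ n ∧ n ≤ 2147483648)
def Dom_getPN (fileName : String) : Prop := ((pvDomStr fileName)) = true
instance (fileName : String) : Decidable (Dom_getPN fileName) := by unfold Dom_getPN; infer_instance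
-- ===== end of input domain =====

-- B replaces A's character loop with an underscore counter by tokenize-then-recombine:
-- split the last '-'-segment on '_' and concatenate the first two tokens (objective: simpler).

-- ===== PORT A =====
-- A's for-loop with `count`, `continue` and `break`, as a structural recursion over the
-- characters of temp carrying the same state (count, result).
def getPNLoop : List Char → Nat → List Char → List Char
  | [], _, result => result
  | c :: rest, count, result =>
    if c = '_' then
      if count + 1 = 2 then result else getPNLoop rest (count + 1) result
    else getPNLoop rest count (result ++ [c])

-- fileName.split('-') is never empty, so Python's [-1] is its last element (getLastD never
-- takes the default).
def getPN (fileName : String) : String :=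
  let temp := ((PySem.Str.split? fileName "-").getD []).getLastD ""
  String.ofList (getPNLoop temp.toList 0 [])

-- ===== PORT B =====
-- temp.split('_') on the single character '_' is exactly List.splitOn '_' on the code points;
-- ''.join(parts[:2]) is (parts.take 2).flatten.
def getPN_alt (fileName : String) : String :=
  let temp := ((PySem.Str.split? fileName "-").getD []).getLastD ""
  String.ofList ((temp.toList.splitOn '_').take 2).flatten

-- ===== PRECONDITION & SPEC =====
def Spec_getPN (fileName : String) (out : String) : Prop := out = getPN_alt fileName
instance (fileName : String) (out : String) : Decidable (Spec_getPN fileName out) := by unfold Spec_getPN; infer_instance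

-- ===== CLAIM (what is proved, stated in full; the proofs are below) =====
def Claim_equal_getPN : Prop := ∀ (fileName : String), Dom_getPN fileName → Spec_getPN fileName (getPN fileName)

-- ===== LEMMAS AND PROOFS =====

-- After the first '_' (count = 1) the loop appends exactly the characters up to the next '_',
-- i.e. the head of the split.
theorem getPNLoop_one (cs : List Char) : ∀ acc : List Char,
    getPNLoop cs 1 acc = acc ++ (cs.splitOn '_').headD [] := by
  induction cs with
  | nil => intro acc; simp [getPNLoop, List.splitOn, List.splitOnP_nil]
  | cons c rest ih =>
    intro acc
    by_cases h : c = '_'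
    · subst h
      simp [getPNLoop, List.splitOn, List.splitOnP_cons]
    · have hne : ¬ (c == '_') = true := by simpa using h
      simp only [getPNLoop, if_neg h, ih, List.splitOn, List.splitOnP_cons, hne]
      rcases h0 : rest.splitOnP (· == '_') with _ | ⟨p, ps⟩
      · exact absurd h0 (List.splitOnP_ne_nil _ _)
      · simp

theorem getPNLoop_zero (cs : List Char) : ∀ acc : List Char,
    getPNLoop cs 0 acc = acc ++ ((cs.splitOn '_').take 2).flatten := by
  induction cs with
  | nil => intro acc; simp [getPNLoop, List.splitOn, List.splitOnP_nil]
  | cons c rest ih =>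
    intro acc
    by_cases h : c = '_'
    · subst h
      simp only [getPNLoop]
      norm_num
      rw [getPNLoop_one]
      simp [List.splitOn, List.splitOnP_cons]
      rcases h0 : rest.splitOnP (· == '_') with _ | ⟨p, ps⟩
      · exact absurd h0 (List.splitOnP_ne_nil _ _)
      · simp
    · have hne : ¬ (c == '_') = true := by simpa using h
      simp only [getPNLoop, if_neg h, ih, List.splitOn, List.splitOnP_cons, hne]
      rcases h0 : rest.splitOnP (· == '_') with _ | ⟨p, ps⟩
      · exact absurd h0 (List.splitOnP_ne_nil _ _)
      · simp

-- ===== VERDICT (by name: the statement is the Claim_ definition above) =====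
theorem getPN_spec : Claim_equal_getPN := by
  intro fileName _
  unfold Spec_getPN getPN getPN_alt
  simp only [getPNLoop_zero, List.nil_append]
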